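-- pv_equiv track=rewrite | github.com/Chai1237/CSES-Problem-Set | Chessboard and Queen.py | RD
-- ===== SOURCE A (Python) =====
-- def RD(x, y, r):
--     for i in range(y if x+y <= 9 else 9-x):
--         n = [x, y]
--         if n in r:
--             r.remove(n)
--         x += 1
--         y -= 1
--     return r
-- ===== SOURCE B (Python) =====
-- def RD(x, y, r):
--     # One pass over r: a cell [a, d] lies on the attacked diagonal segment iff
--     # a + d == x + y and x <= a < x + b; remove only the first occurrence of
--     # each such cell (tracked in `removed`).  Mutates r in place and returns it,
--     # like the original.
--     b = y if x + y <= 9 else 9 - x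
--     removed = set()
--     kept = []
--     for c in r:
--         if len(c) == 2 and c[0] + c[1] == x + y and x <= c[0] < x + b and tuple(c) not in removed:
--             removed.add(tuple(c))
--         else:
--             kept.append(c)
--     r[:] = kept
--     return r
-- ===== Notes on version B (the rewrite author's own statement) =====
-- stated objective: alternative
-- what changed: Instead of iterating over every cell of the diagonal (up to y iterations, each scanning r for membership and removal), B makes a single pass over r, deciding diagonal membership arithmetically per cell and tracking already-removed cells in a set.
import Mathlib
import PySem

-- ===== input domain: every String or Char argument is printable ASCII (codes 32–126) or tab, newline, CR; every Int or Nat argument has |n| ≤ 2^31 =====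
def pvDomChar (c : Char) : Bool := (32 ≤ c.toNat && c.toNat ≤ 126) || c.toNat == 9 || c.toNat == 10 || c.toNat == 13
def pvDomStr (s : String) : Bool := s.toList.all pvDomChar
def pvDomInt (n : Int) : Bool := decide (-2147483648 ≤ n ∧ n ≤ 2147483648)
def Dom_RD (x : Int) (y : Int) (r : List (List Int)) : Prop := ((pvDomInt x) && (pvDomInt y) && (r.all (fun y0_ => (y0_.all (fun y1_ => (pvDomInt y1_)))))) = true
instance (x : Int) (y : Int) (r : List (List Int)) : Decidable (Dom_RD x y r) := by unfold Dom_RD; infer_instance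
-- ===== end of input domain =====

-- B replaces A's loop over the whole diagonal (with an inner scan of r per step) by a
-- single pass over r with an arithmetic diagonal test; equivalence is about the return
-- value only (both Pythons also mutate r in place to the same final contents).

-- ===== PORT A =====
-- one iteration of A's for-loop; state = (x, y, r)
def RD_step (st : Int × Int × List (List Int)) (_i : Int) : Int × Int × List (List Int) :=
  let n : List Int := [st.1, st.2.1]
  let r' := if n ∈ st.2.2 then (PySem.List.remove? st.2.2 n).getD st.2.2 else st.2.2
  (st.1 + 1, st.2.1 - 1, r')

def RD (x : Int) (y : Int) (r : List (List Int)) : List (List Int) :=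
  let s := (PySem.List.pyRange 0 (if x + y ≤ 9 then y else 9 - x) 1).foldl RD_step (x, y, r)
  s.2.2

-- ===== PORT B =====
-- one iteration of B's for-loop; acc = (kept, removed).  Python's set of 2-tuples is
-- represented as a PySem.Set of the 2-element lists themselves (tuple(c) ↔ c is a
-- bijection preserving equality, so membership/add are exact).
def RD_alt_step (x y b : Int) (acc : List (List Int) × PySem.Set (List Int))
    (c : List Int) : List (List Int) × PySem.Set (List Int) :=
  match c with
  | [a, d] =>
    if a + d = x + y ∧ x ≤ a ∧ a < x + b ∧ PySem.Set.contains acc.2 c = false then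
      (acc.1, PySem.Set.add acc.2 c)
    else (acc.1 ++ [c], acc.2)
  | _ => (acc.1 ++ [c], acc.2)

def RD_alt (x : Int) (y : Int) (r : List (List Int)) : List (List Int) :=
  let b := if x + y ≤ 9 then y else 9 - x
  let p := r.foldl (RD_alt_step x y b) ([], PySem.Set.empty)
  p.1

-- ===== PRECONDITION & SPEC =====
def Spec_RD (x : Int) (y : Int) (r : List (List Int)) (out : List (List Int)) : Prop := out = RD_alt x y r
instance (x : Int) (y : Int) (r : List (List Int)) (out : List (List Int)) : Decidable (Spec_RD x y r out) := by unfold Spec_RD; infer_instance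

-- ===== CLAIM (what is proved, stated in full; the proofs are below) =====
def Claim_equal_RD : Prop := ∀ (x : Int) (y : Int) (r : List (List Int)), Dom_RD x y r → Spec_RD x y r (RD x y r)

-- ===== LEMMAS AND PROOFS =====

-- the list of diagonal cells [x,y], [x+1,y-1], …
def diagL (x y : Int) : Nat → List (List Int)
  | 0 => []
  | n + 1 => [x, y] :: diagL (x + 1) (y - 1) n

theorem mem_diagL (n : Nat) (x y : Int) (c : List Int) :
    c ∈ diagL x y n ↔ ∃ k : Nat, k < n ∧ c = [x + (k : Int), y - (k : Int)] := by
  induction n generalizing x y with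
  | zero => simp [diagL]
  | succ m ih =>
    simp only [diagL, List.mem_cons, ih]
    constructor
    · rintro (rfl | ⟨k, hk, rfl⟩)
      · exact ⟨0, by omega, by simp⟩
      · exact ⟨k + 1, by omega, by push_cast; ring_nf⟩
    · rintro ⟨k, hk, rfl⟩
      cases k with
      | zero => left; simp
      | succ j => right; exact ⟨j, by omega, by push_cast; ring_nf⟩

theorem nodup_diagL (n : Nat) (x y : Int) : (diagL x y n).Nodup := by
  induction n generalizing x y with
  | zero => simp [diagL]
  | succ m ih =>
    refine List.nodup_cons.mpr ⟨?_, ih _ _⟩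
    intro hmem
    rcases (mem_diagL m (x + 1) (y - 1) [x, y]).mp hmem with ⟨k, _, h⟩
    simp only [List.cons.injEq] at h
    omega

-- A's loop, re-expressed as a fold of conditional first-occurrence removals over diagL
theorem lemA (l : List Int) (x y : Int) (r : List (List Int)) :
    (l.foldl RD_step (x, y, r)).2.2
      = (diagL x y l.length).foldl (fun r n => if n ∈ r then r.erase n else r) r := by
  induction l generalizing x y r with
  | nil => simp [diagL]
  | cons i l ih =>
    have hstep : RD_step (x, y, r) i
        = (x + 1, y - 1, if [x, y] ∈ r then r.erase [x, y] else r) := by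
      simp only [RD_step]
      by_cases h : [x, y] ∈ r
      · simp [h, PySem.List.remove?_eq_some_erase r [x, y] h]
      · simp [h]
    simp only [List.foldl_cons, List.length_cons, diagL, hstep]
    exact ih (x + 1) (y - 1) _

theorem foldl_erase_nil (D : List (List Int)) :
    D.foldl (fun (r : List (List Int)) n => r.erase n) [] = [] := by
  induction D with
  | nil => rfl
  | cons d D ih => simpa using ih

theorem foldl_erase_cons (D : List (List Int)) (c : List Int) (r : List (List Int)) :
    D.foldl (fun r n => r.erase n) (c :: r)
      = if c ∈ D then (D.erase c).foldl (fun r n => r.erase n) r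
        else c :: D.foldl (fun r n => r.erase n) r := by
  induction D generalizing r with
  | nil => simp
  | cons d D ih =>
    by_cases hcd : c = d
    · subst hcd
      simp
    · have h1 : (c == d) = false := beq_eq_false_iff_ne.mpr hcd
      have h2 : (d == c) = false := beq_eq_false_iff_ne.mpr (Ne.symm hcd)
      simp only [List.foldl_cons, List.erase_cons, List.mem_cons, h1, h2, Bool.false_eq_true,
        if_false]
      rw [ih]
      by_cases hc : c ∈ D
      · rw [if_pos hc, if_pos (Or.inr hc)]
      · rw [if_neg hc, if_neg (by rintro (h | h); exact hcd h; exact hc h)]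

-- single pass with a shrinking pending list
def passFn : List (List Int) → List (List Int) → List (List Int)
  | [], _ => []
  | c :: r, D => if c ∈ D then passFn r (D.erase c) else c :: passFn r D

theorem pass_eq (r D : List (List Int)) :
    D.foldl (fun r n => r.erase n) r = passFn r D := by
  induction r generalizing D with
  | nil => simpa [passFn] using foldl_erase_nil D
  | cons c r ih =>
    rw [passFn, foldl_erase_cons]
    split_ifs with h
    · exact ih _
    · rw [ih]

def isDiagB (x y b : Int) : List Int → Bool
  | [a, d] => decide (a + d = x + y ∧ x ≤ a ∧ a < x + b)
  | _ => false

-- B's pass, with the pending set replaced by its complement `removed`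
def bpass (x y b : Int) : List (List Int) → List (List Int) → List (List Int)
  | [], _ => []
  | c :: r, s =>
    if isDiagB x y b c = true ∧ c ∉ s then bpass x y b r (s ++ [c])
    else c :: bpass x y b r s

theorem pass_eq_bpass (x y b : Int) (r : List (List Int)) :
    ∀ (D s : List (List Int)), D.Nodup →
      (∀ c, c ∈ D ↔ (isDiagB x y b c = true ∧ c ∉ s)) →
      passFn r D = bpass x y b r s := by
  induction r with
  | nil => intro D s _ _; rfl
  | cons c r ih =>
    intro D s hnd hinv
    rw [passFn, bpass]
    by_cases h : c ∈ D
    · rw [if_pos h, if_pos ((hinv c).mp h)]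
      refine ih _ _ (hnd.erase c) ?_
      intro c'
      rw [hnd.mem_erase_iff, hinv c']
      constructor
      · rintro ⟨hne, hd, hns⟩
        exact ⟨hd, by simp [hne, hns]⟩
      · rintro ⟨hd, hns⟩
        simp only [List.mem_append, List.mem_singleton, not_or] at hns
        exact ⟨hns.2, hd, hns.1⟩
    · rw [if_neg h, if_neg (fun hc => h ((hinv c).mpr hc))]
      exact congrArg (c :: ·) (ih _ _ hnd hinv)

theorem contains_eq_false_iff (s : PySem.Set (List Int)) (c : List Int) :
    PySem.Set.contains s c = false ↔ c ∉ s := by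
  simp [PySem.Set.contains]

-- B's fold accumulates kept ++ bpass
theorem lemB (x y b : Int) (r : List (List Int)) :
    ∀ (k : List (List Int)) (s : PySem.Set (List Int)),
      (r.foldl (RD_alt_step x y b) (k, s)).1 = k ++ bpass x y b r s := by
  induction r with
  | nil => intro k s; simp [bpass]
  | cons c r ih =>
    intro k s
    rw [List.foldl_cons, bpass]
    by_cases h : isDiagB x y b c = true ∧ c ∉ s
    · rw [if_pos h]
      have hstep : RD_alt_step x y b (k, s) c = (k, s ++ [c]) := by
        rcases h with ⟨hdiag, hns⟩
        match c with
        | [a, d] =>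
          simp only [isDiagB, decide_eq_true_eq] at hdiag
          simp [RD_alt_step, hdiag, PySem.Set.add, PySem.Set.contains, hns]
      rw [hstep, ih]
    · rw [if_neg h]
      have hstep : RD_alt_step x y b (k, s) c = (k ++ [c], s) := by
        match c with
        | [] => rfl
        | [a] => rfl
        | a :: d :: e :: t => rfl
        | [a, d] =>
          simp only [isDiagB, decide_eq_true_eq, not_and, not_not] at h
          simp only [RD_alt_step]
          rw [if_neg]
          intro ⟨h1, h2, h3, h4⟩
          exact ((contains_eq_false_iff s [a, d]).mp h4) (h ⟨h1, h2, h3⟩)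
      rw [hstep, ih, List.append_assoc]; rfl

theorem diag_inv (x y b : Int) (c : List Int) :
    c ∈ diagL x y b.toNat ↔ (isDiagB x y b c = true ∧ c ∉ ([] : List (List Int))) := by
  rw [mem_diagL]
  simp only [List.not_mem_nil, not_false_iff, and_true]
  constructor
  · rintro ⟨k, hk, rfl⟩
    simp only [isDiagB, decide_eq_true_eq]
    refine ⟨by ring, by omega, by omega⟩
  · intro hdiag
    match c with
    | [] => simp [isDiagB] at hdiag
    | [a] => simp [isDiagB] at hdiag
    | a :: d :: e :: t => simp [isDiagB] at hdiag
    | [a, d] =>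
      simp only [isDiagB, decide_eq_true_eq] at hdiag
      obtain ⟨h1, h2, h3⟩ := hdiag
      refine ⟨(a - x).toNat, by omega, ?_⟩
      have h4 : ((a - x).toNat : Int) = a - x := by omega
      simp only [h4]
      rw [show x + (a - x) = a by ring, show y - (a - x) = d by omega]

theorem erc_eq_er (D r : List (List Int)) :
    D.foldl (fun r n => if n ∈ r then r.erase n else r) r
      = D.foldl (fun r n => r.erase n) r := by
  have h : (fun (r : List (List Int)) n => if n ∈ r then r.erase n else r)
      = fun r n => r.erase n := by
    funext r n
    by_cases h : n ∈ r
    · simp [h]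
    · simp [h, List.erase_of_not_mem h]
  rw [h]

-- ===== VERDICT (by name: the statement is the Claim_ definition above) =====
theorem RD_spec : Claim_equal_RD := by
  intro x y r _
  unfold Spec_RD RD RD_alt
  set b := if x + y ≤ 9 then y else 9 - x with hb
  rw [lemA, PySem.List.length_pyRange_one]
  have hlen : (b - 0).toNat = b.toNat := by omega
  rw [hlen, erc_eq_er, pass_eq, pass_eq_bpass x y b r (diagL x y b.toNat) []
      (nodup_diagL _ _ _) (diag_inv x y b), lemB]
  rfl
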